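-- pv_equiv track=rewrite | github.com/siarheiminsk/Py2022 | module4-1.py | aggregated_dictionaries
-- ===== SOURCE A (Python) =====
-- def aggregated_dictionaries(d_list):
--     # number of current dictionary
--     dict_number = 0
--     # aggregated dictionary
--     agg_dict = {}
--     # iterate through the dictionaries list
--     for d in d_list:
--         # iterate through same keys in all dictionaries
--         for key_name in (list(d.keys())):
--             # reset parameters
--             # set maximal value for particular key
--             max_value = 0
--             # set current dictionary number
--             dict_entry = 0
--             # iterate through all dictionaries
--             for i in range(len(d_list)):
--                 # if the key exists in the dictionary
--                 if d_list[i].get(key_name) is not None: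
--                     # compare current value with max_value
--                     if d_list[i].get(key_name) > max_value:
--                         # set new max_value
--                         max_value = d_list[i].get(key_name)
--                         # save current dictionary number
--                         dict_entry = i
--                         # increment to determine non unique keys
--                         dict_number += 1
--                     else:
--                         # increment to determine non unique keys
--                         dict_number += 1
--             # if the key is unique
--             if dict_number == 1:
--                 # write to aggregated dictionary key name without the dictionary number
--                 agg_dict[key_name] = max_value
--             # if the key is non unique
--             else:
--                 # write to aggregated dictionary key name with the dictionary number
--                 agg_dict[key_name + '_' + str(dict_entry+1)] = max_value
--             # reset variable for future use
--             dict_number = 0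
--     return agg_dict
-- ===== SOURCE B (Python) =====
-- def aggregated_dictionaries(d_list):
--     # one pass: key -> (occurrence count, running max (floored at 0), index of first max)
--     stats = {}
--     for i, d in enumerate(d_list):
--         for k, v in d.items():
--             cnt, best, best_i = stats.get(k, (0, 0, 0))
--             if v > best:
--                 best, best_i = v, i
--             stats[k] = (cnt + 1, best, best_i)
--     # emit in encounter order with the same naming rule
--     agg = {}
--     for d in d_list:
--         for k in d:
--             cnt, best, best_i = stats[k]
--             if cnt == 1:
--                 agg[k] = best
--             else:
--                 agg[k + '_' + str(best_i + 1)] = best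
--     return agg
-- ===== Notes on version B (the rewrite author's own statement) =====
-- stated objective: faster
-- what changed: Instead of rescanning every dictionary for every key occurrence, B builds in one pass a key -> (count, max, first-max-index) map over all dictionaries and then emits the aggregated entries in the same encounter order.
import Mathlib
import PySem

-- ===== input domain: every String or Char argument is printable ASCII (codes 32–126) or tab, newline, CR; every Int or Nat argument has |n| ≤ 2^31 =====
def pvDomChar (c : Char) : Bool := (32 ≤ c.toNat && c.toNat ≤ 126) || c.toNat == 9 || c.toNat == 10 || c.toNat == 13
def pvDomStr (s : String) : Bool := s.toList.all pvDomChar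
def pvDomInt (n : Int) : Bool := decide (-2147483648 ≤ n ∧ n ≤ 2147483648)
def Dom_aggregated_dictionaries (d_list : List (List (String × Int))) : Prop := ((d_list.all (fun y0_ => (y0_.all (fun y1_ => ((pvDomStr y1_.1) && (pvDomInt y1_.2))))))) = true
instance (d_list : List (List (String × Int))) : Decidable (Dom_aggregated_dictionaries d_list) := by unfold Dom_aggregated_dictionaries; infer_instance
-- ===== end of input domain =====

-- B replaces A's per-key rescan of every dictionary (O(D² · K)) by one pass building a
-- key → (count, max, first-max-index) map and a second pass emitting in encounter order.

-- ===== PORT A =====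
-- A's innermost loop: for i in range(len(d_list)): state (max_value, dict_entry, dict_number)
def aggA_scan (d_list : List (List (String × Int))) (key : String) (dn0 : Int) : Int × Int × Int :=
  (PySem.List.pyRange 0 (d_list.length : Int) 1).foldl
    (fun s i =>
      match (PySem.Dict.ofList (PySem.List.pyGetD d_list i [])).get? key with
      | none => s
      | some v => if v > s.1 then (v, i, s.2.2 + 1) else (s.1, s.2.1, s.2.2 + 1))
    (0, 0, dn0)

-- A's per-key body: scan, then write into agg_dict; dict_number is reset to 0
def aggA_key_body (d_list : List (List (String × Int)))
    (st : Int × PySem.Dict String Int) (key_name : String) : Int × PySem.Dict String Int :=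
  let r := aggA_scan d_list key_name st.1
  let agg := if r.2.2 == 1 then st.2.insert key_name r.1
             else st.2.insert (key_name ++ "_" ++ PySem.Int.toStr (r.2.1 + 1)) r.1
  (0, agg)

def aggregated_dictionaries (d_list : List (List (String × Int))) : List (String × Int) :=
  ((d_list.foldl
      (fun st d => ((PySem.Dict.ofList d).keys).foldl (aggA_key_body d_list) st)
      ((0 : Int), PySem.Dict.empty)).2).items

-- ===== PORT B =====
-- one item of one dict folded into the stats map: key -> (count, best, best_index)
def aggB_items_step (i : Int) (stats : PySem.Dict String (Int × Int × Int))
    (kv : String × Int) : PySem.Dict String (Int × Int × Int) :=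
  let s := stats.getD kv.1 (0, 0, 0)
  let bb := if kv.2 > s.2.1 then (kv.2, i) else (s.2.1, s.2.2)
  stats.insert kv.1 (s.1 + 1, bb.1, bb.2)

def aggB_stats (d_list : List (List (String × Int))) : PySem.Dict String (Int × Int × Int) :=
  (PySem.List.enumerate d_list).foldl
    (fun stats p => ((PySem.Dict.ofList p.2).items).foldl (aggB_items_step p.1) stats)
    PySem.Dict.empty

-- second pass: emit one dict's keys into agg using the stats map
def aggB_emit (stats : PySem.Dict String (Int × Int × Int))
    (agg : PySem.Dict String Int) (d : List (String × Int)) : PySem.Dict String Int :=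
  ((PySem.Dict.ofList d).keys).foldl
    (fun agg k =>
      let s := stats.getD k (0, 0, 0)
      if s.1 == 1 then agg.insert k s.2.1
      else agg.insert (k ++ "_" ++ PySem.Int.toStr (s.2.2 + 1)) s.2.1)
    agg

def aggregated_dictionaries_alt (d_list : List (List (String × Int))) : List (String × Int) :=
  (d_list.foldl (aggB_emit (aggB_stats d_list)) PySem.Dict.empty).items

-- ===== PRECONDITION & SPEC =====
def Spec_aggregated_dictionaries (d_list : List (List (String × Int))) (out : List (String × Int)) : Prop := out = aggregated_dictionaries_alt d_list
instance (d_list : List (List (String × Int))) (out : List (String × Int)) : Decidable (Spec_aggregated_dictionaries d_list out) := by unfold Spec_aggregated_dictionaries; infer_instance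

-- ===== CLAIM (what is proved, stated in full; the proofs are below) =====
def Claim_equal_aggregated_dictionaries : Prop := ∀ (d_list : List (List (String × Int))), Dom_aggregated_dictionaries d_list → Spec_aggregated_dictionaries d_list (aggregated_dictionaries d_list)

-- ===== LEMMAS AND PROOFS =====

-- B's per-key update, as a function of (state, index, looked-up value)
def aggB_F (i : Int) (s : Int × Int × Int) (v : Int) : Int × Int × Int :=
  (s.1 + 1, (if v > s.2.1 then (v, i) else (s.2.1, s.2.2)).1, (if v > s.2.1 then (v, i) else (s.2.1, s.2.2)).2)

-- A's per-key update over enumerate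
def aggA_F (i : Int) (s : Int × Int × Int) (v : Int) : Int × Int × Int :=
  if v > s.1 then (v, i, s.2.2 + 1) else (s.1, s.2.1, s.2.2 + 1)


theorem enumerate_append_singleton {α : Type} (x : α) :
    ∀ (l : List α) (s : Int), PySem.List.enumerate (l ++ [x]) s = PySem.List.enumerate l s ++ [(s + l.length, x)]
  | [], s => by simp [PySem.List.enumerate_cons]
  | y :: t, s => by
    simp only [List.cons_append, PySem.List.enumerate_cons, enumerate_append_singleton x t (s+1),
      List.length_cons]
    push_cast
    ring_nf

theorem foldl_pyRange_eq_foldl_enumerate {α σ : Type} (g : σ → Int → α → σ) (z : α) (l : List α) (init : σ) :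
      (PySem.List.pyRange 0 (l.length : Int) 1).foldl (fun s i => g s i (PySem.List.pyGetD l i z)) init
      = (PySem.List.enumerate l).foldl (fun s p => g s p.1 p.2) init := by
  induction l using List.reverseRecOn generalizing init with
  | nil => simp [PySem.List.pyRange_one_eq_nil]
  | append_singleton l x ih =>
    have hn : ((l ++ [x]).length : Int) = (l.length : Int) + 1 := by simp
    rw [hn, PySem.List.pyRange_one_succ_right (by positivity), List.foldl_append,
      enumerate_append_singleton, List.foldl_append]
    have hcongr : (PySem.List.pyRange 0 (l.length : Int) 1).foldl
        (fun s i => g s i (PySem.List.pyGetD (l ++ [x]) i z)) init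
        = (PySem.List.pyRange 0 (l.length : Int) 1).foldl
        (fun s i => g s i (PySem.List.pyGetD l i z)) init := by
      apply PySem.List.foldl_congr_mem
      intro acc i hi
      rw [PySem.List.mem_pyRange_one] at hi
      have h1 : PySem.List.pyGetD (l ++ [x]) i z = l[i.toNat] := by
        rw [PySem.List.pyGetD_eq_getElem (l ++ [x]) z hi.1 (by simp; omega)]
        exact List.getElem_append_left (by omega)
      have h2 : PySem.List.pyGetD l i z = l[i.toNat] :=
        PySem.List.pyGetD_eq_getElem l z hi.1 (by exact_mod_cast hi.2)
      rw [h1, h2]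
    rw [hcongr, ih]
    simp only [List.foldl_cons, List.foldl_nil]
    have h3 : PySem.List.pyGetD (l ++ [x]) (l.length : Int) z = x := by
      rw [PySem.List.pyGetD_eq_getElem (l ++ [x]) z (by positivity) (by simp)]
      simp
    rw [h3]
    norm_num


theorem itemsFold_getD_not_mem {S : Type} (upd : Int → S → Int → S) (z : S) (k : String) :
    ∀ (l : List (String × Int)) (i : Int) (st : PySem.Dict String S),
      k ∉ l.map Prod.fst →
      (l.foldl (fun st p => st.insert p.1 (upd i (st.getD p.1 z) p.2)) st).getD k z = st.getD k z
  | [], _, _, _ => rfl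
  | p :: rest, i, st, h => by
    simp only [List.map_cons, List.mem_cons, not_or] at h
    simp only [List.foldl_cons]
    rw [itemsFold_getD_not_mem upd z k rest i _ h.2, PySem.Dict.getD_insert, if_neg h.1]

theorem itemsFold_getD {S : Type} (upd : Int → S → Int → S) (z : S) (k : String) :
    ∀ (l : List (String × Int)) (i : Int) (st : PySem.Dict String S),
      (l.map Prod.fst).Nodup →
      (l.foldl (fun st p => st.insert p.1 (upd i (st.getD p.1 z) p.2)) st).getD k z
      = match l.find? (fun p => p.1 == k) with
        | none => st.getD k z
        | some p => upd i (st.getD k z) p.2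
  | [], _, _, _ => rfl
  | p :: rest, i, st, h => by
    simp only [List.map_cons, List.nodup_cons] at h
    simp only [List.foldl_cons, List.find?_cons]
    by_cases hpk : p.1 = k
    · subst hpk
      rw [itemsFold_getD_not_mem upd z p.1 rest i _ h.1]
      simp
    · have hb : (p.1 == k) = false := by simpa using hpk
      rw [itemsFold_getD upd z k rest i _ h.2, PySem.Dict.getD_insert]
      simp only [hb]
      cases rest.find? (fun q => q.1 == k) <;> simp [Ne.symm hpk]

theorem statsB_getD (k : String) :
    ∀ (pairs : List (Int × List (String × Int))) (st : PySem.Dict String (Int × Int × Int)),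
      (pairs.foldl (fun st p => ((PySem.Dict.ofList p.2).items).foldl (aggB_items_step p.1) st) st).getD k (0, 0, 0)
      = pairs.foldl
          (fun s p => match (PySem.Dict.ofList p.2).get? k with
            | none => s
            | some v => aggB_F p.1 s v)
          (st.getD k (0, 0, 0))
  | [], st => rfl
  | p :: rest, st => by
    simp only [List.foldl_cons]
    rw [statsB_getD k rest]
    have hstep : (((PySem.Dict.ofList p.2).items).foldl (aggB_items_step p.1) st).getD k (0, 0, 0)
        = match (PySem.Dict.ofList p.2).get? k with
          | none => st.getD k (0, 0, 0)
          | some v => aggB_F p.1 (st.getD k (0, 0, 0)) v := by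
      have hfun : aggB_items_step p.1 =
          fun st q => st.insert q.1 (aggB_F p.1 (st.getD q.1 (0, 0, 0)) q.2) := by
        funext st q
        simp [aggB_items_step, aggB_F]
      rw [hfun, itemsFold_getD (aggB_F) (0,0,0) k _ p.1 st
        (by simpa [PySem.Dict.keys] using PySem.Dict.nodup_keys_ofList p.2)]
      show _ = match (PySem.Dict.ofList p.2).get? k with
          | none => st.getD k ((0:Int), (0:Int), (0:Int))
          | some v => aggB_F p.1 (st.getD k (0, 0, 0)) v
      rw [show (PySem.Dict.ofList p.2).get? k
          = ((PySem.Dict.ofList p.2).items.find? (fun q => q.1 == k)).map Prod.snd from rfl]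
      cases (PySem.Dict.ofList p.2).items.find? (fun q => q.1 == k) <;> rfl
    rw [hstep]

theorem scan_triples (k : String) :
    ∀ (pairs : List (Int × List (String × Int))) (s : Int × Int × Int),
      pairs.foldl (fun s p => match (PySem.Dict.ofList p.2).get? k with | none => s | some v => aggB_F p.1 s v) (s.2.2, s.1, s.2.1)
      = ((pairs.foldl (fun s p => match (PySem.Dict.ofList p.2).get? k with | none => s | some v => aggA_F p.1 s v) s).2.2,
         (pairs.foldl (fun s p => match (PySem.Dict.ofList p.2).get? k with | none => s | some v => aggA_F p.1 s v) s).1,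
         (pairs.foldl (fun s p => match (PySem.Dict.ofList p.2).get? k with | none => s | some v => aggA_F p.1 s v) s).2.1)
  | [], s => rfl
  | p :: rest, s => by
    simp only [List.foldl_cons]
    have hstep : (match (PySem.Dict.ofList p.2).get? k with | none => (s.2.2, s.1, s.2.1) | some v => aggB_F p.1 (s.2.2, s.1, s.2.1) v)
        = ((match (PySem.Dict.ofList p.2).get? k with | none => s | some v => aggA_F p.1 s v).2.2,
           (match (PySem.Dict.ofList p.2).get? k with | none => s | some v => aggA_F p.1 s v).1,
           (match (PySem.Dict.ofList p.2).get? k with | none => s | some v => aggA_F p.1 s v).2.1) := by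
      cases (PySem.Dict.ofList p.2).get? k with
      | none => rfl
      | some v =>
        simp only [aggB_F, aggA_F]
        split_ifs <;> rfl
    rw [hstep]
    exact scan_triples k rest _

theorem key_stats (d_list : List (List (String × Int))) (k : String) :
    (aggB_stats d_list).getD k (0, 0, 0)
    = ((aggA_scan d_list k 0).2.2, (aggA_scan d_list k 0).1, (aggA_scan d_list k 0).2.1) := by
  have hA : aggA_scan d_list k 0
      = (PySem.List.enumerate d_list).foldl
          (fun s p => match (PySem.Dict.ofList p.2).get? k with | none => s | some v => aggA_F p.1 s v)
          (0, 0, 0) := by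
    show (PySem.List.pyRange 0 (d_list.length : Int) 1).foldl
        (fun s i => (fun (s : Int × Int × Int) (i : Int) (d : List (String × Int)) =>
          match (PySem.Dict.ofList d).get? k with | none => s | some v => aggA_F i s v) s i
          (PySem.List.pyGetD d_list i [])) (0, 0, 0) = _
    exact foldl_pyRange_eq_foldl_enumerate
      (fun (s : Int × Int × Int) (i : Int) (d : List (String × Int)) =>
        match (PySem.Dict.ofList d).get? k with | none => s | some v => aggA_F i s v)
      [] d_list (0, 0, 0)
  unfold aggB_stats
  rw [statsB_getD k (PySem.List.enumerate d_list) PySem.Dict.empty, PySem.Dict.getD_empty, hA]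
  exact scan_triples k (PySem.List.enumerate d_list) (0, 0, 0)

theorem keys_fold_eq (d_list : List (List (String × Int))) :
    ∀ (ks : List String) (agg : PySem.Dict String Int),
      ks.foldl (aggA_key_body d_list) ((0 : Int), agg)
      = (0, ks.foldl (fun agg k =>
          let s := (aggB_stats d_list).getD k (0, 0, 0)
          if s.1 == 1 then agg.insert k s.2.1
          else agg.insert (k ++ "_" ++ PySem.Int.toStr (s.2.2 + 1)) s.2.1) agg)
  | [], _ => rfl
  | k :: ks, agg => by
    simp only [List.foldl_cons]
    have hb : aggA_key_body d_list ((0 : Int), agg) k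
        = ((0 : Int), (let s := (aggB_stats d_list).getD k (0, 0, 0)
            if s.1 == 1 then agg.insert k s.2.1
            else agg.insert (k ++ "_" ++ PySem.Int.toStr (s.2.2 + 1)) s.2.1)) := by
      simp only [aggA_key_body, key_stats d_list k]
    rw [hb]
    exact keys_fold_eq d_list ks _

theorem emit_eq (d_list : List (List (String × Int))) :
    ∀ (ds : List (List (String × Int))) (agg : PySem.Dict String Int),
      ds.foldl (fun st d => ((PySem.Dict.ofList d).keys).foldl (aggA_key_body d_list) st) ((0 : Int), agg)
      = (0, ds.foldl (aggB_emit (aggB_stats d_list)) agg)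
  | [], _ => rfl
  | d :: ds, agg => by
    simp only [List.foldl_cons]
    rw [keys_fold_eq d_list ((PySem.Dict.ofList d).keys) agg]
    exact emit_eq d_list ds _

-- ===== VERDICT (by name: the statement is the Claim_ definition above) =====
theorem aggregated_dictionaries_spec : Claim_equal_aggregated_dictionaries := by
  intro d_list _
  unfold Spec_aggregated_dictionaries aggregated_dictionaries aggregated_dictionaries_alt
  rw [emit_eq d_list d_list PySem.Dict.empty]
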